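-- pv_equiv track=rewrite | github.com/shuo-git/GraphGAN | graphGAN/utils/recommendation.py | BFS
-- ===== SOURCE A (Python) =====
-- import collections
--
-- def BFS(graph, root):
--     tree = {}
--     tree[root] = [root]
--     used_nodes = set()
--     queue = collections.deque([root])
--     while len(queue) > 0:
--         cur_node = queue.popleft()
--         used_nodes.add(cur_node)
--         for sub_node in graph[cur_node]:
--             if sub_node not in used_nodes:
--                 tree[cur_node].append(sub_node)
--                 tree[sub_node] = [cur_node]
--                 queue.append(sub_node)
--                 used_nodes.add(sub_node)
--     return tree
-- ===== SOURCE B (Python) =====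
-- def BFS(graph, root):
--     # pass 1: plain reachability sweep recording only discovery order and each
--     # node's parent (no tree lists are built or mutated during the traversal)
--     parent = {root: root}
--     order = [root]
--     level = [root]
--     while level:
--         nxt = []
--         for u in level:
--             for v in graph[u]:
--                 if v not in parent:
--                     parent[v] = u
--                     order.append(v)
--                     nxt.append(v)
--         level = nxt
--     # pass 2: group the discovered nodes by their parent (discovery order is
--     # exactly the order A appends children), then assemble every tree entry at once
--     children = {}
--     for w in order[1:]:
--         children.setdefault(parent[w], []).append(w)
--     return {v: [parent[v]] + children.get(v, []) for v in order}
-- ===== Notes on version B (the rewrite author's own statement) =====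
-- stated objective: alternative
-- what changed: Instead of mutating per-node tree lists inside a deque-driven BFS loop, B stages the work: a traversal pass records only discovery order and a parent map, a grouping pass buckets nodes by parent, and the tree dict is assembled at the end from parent[v] plus the bucketed children, never touching a tree list during traversal.
import Mathlib
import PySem

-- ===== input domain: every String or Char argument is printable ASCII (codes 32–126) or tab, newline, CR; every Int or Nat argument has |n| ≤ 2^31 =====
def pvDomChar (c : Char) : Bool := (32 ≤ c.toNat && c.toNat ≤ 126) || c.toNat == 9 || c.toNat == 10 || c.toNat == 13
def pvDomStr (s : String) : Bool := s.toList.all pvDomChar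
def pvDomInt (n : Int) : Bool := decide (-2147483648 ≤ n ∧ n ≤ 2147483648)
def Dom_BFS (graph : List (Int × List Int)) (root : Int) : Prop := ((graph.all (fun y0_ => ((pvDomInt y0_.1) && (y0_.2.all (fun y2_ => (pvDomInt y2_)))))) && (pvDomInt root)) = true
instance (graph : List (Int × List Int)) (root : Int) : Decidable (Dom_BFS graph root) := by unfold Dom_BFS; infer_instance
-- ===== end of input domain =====

-- B replaces A's single mutate-as-you-go BFS loop (per-node tree lists appended inside a
-- deque-driven traversal) by staged passes: a traversal recording only discovery order and
-- a parent map, then a grouping pass bucketing nodes by parent, then one assembly of the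
-- tree dict.  Objective: alternative decomposition, same cost.

-- ===== PORT A =====
-- inner loop body of A: 'for sub_node in graph[cur_node]: if sub_node not in used: …'
def bfsStep (cur : Int)
    (st : PySem.Dict Int (List Int) × PySem.Set Int × List Int) (sub : Int) :
    PySem.Dict Int (List Int) × PySem.Set Int × List Int :=
  match st with
  | (tree, used, out) =>
    if PySem.Set.contains used sub then (tree, used, out)
    else ((PySem.Dict.modify tree cur [] (fun l => l ++ [sub])).insert sub [cur],
          PySem.Set.add used sub, out ++ [sub])
-- tree[cur].append(sub) is Dict.modify with default []: cur is always a key of tree when scanned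

def bfsVisit (g : PySem.Dict Int (List Int)) (cur : Int)
    (st : PySem.Dict Int (List Int) × PySem.Set Int × List Int) :
    PySem.Dict Int (List Int) × PySem.Set Int × List Int :=
  (PySem.Dict.getD g cur []).foldl (bfsStep cur) st

def bfsUniv (g : PySem.Dict Int (List Int)) : Finset Int := (g.values.flatten).toFinset

-- lemmas the ports need for termination (cited in decreasing_by)
lemma bfsSet_toFinset_add (u : PySem.Set Int) (x : Int) :
    (PySem.Set.add u x).toFinset = insert x u.toFinset := by
  rw [PySem.Set.add_eq_ite]
  split_ifs with h
  · rw [Finset.insert_eq_self.2 (List.mem_toFinset.2 h)]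
  · ext y
    simp only [List.toFinset_append, Finset.mem_union, List.mem_toFinset, List.toFinset_cons,
      List.toFinset_nil, insert_empty_eq, Finset.mem_insert, Finset.mem_singleton]
    tauto

lemma bfsVisit_spec (cur : Int) (l : List Int) (t : PySem.Dict Int (List Int))
    (u : PySem.Set Int) (acc : List Int) :
    ∃ ν : List Int,
      (l.foldl (bfsStep cur) (t, u, acc)).2.2 = acc ++ ν ∧
      ((l.foldl (bfsStep cur) (t, u, acc)).2.1).toFinset = u.toFinset ∪ ν.toFinset ∧
      ν.Nodup ∧ (∀ x ∈ ν, x ∈ l ∧ x ∉ u) := by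
  induction l generalizing t u acc with
  | nil => exact ⟨[], by simp⟩
  | cons c l ih =>
    by_cases hc : c ∈ u
    · have hred : ((c :: l).foldl (bfsStep cur) (t, u, acc))
          = l.foldl (bfsStep cur) (t, u, acc) := by
        simp [bfsStep, hc]
      rw [hred]
      obtain ⟨ν, h1, h2, h3, h4⟩ := ih t u acc
      exact ⟨ν, h1, h2, h3,
        fun x hx => ⟨List.mem_cons_of_mem _ (h4 x hx).1, (h4 x hx).2⟩⟩
    · have hred : ((c :: l).foldl (bfsStep cur) (t, u, acc))
          = l.foldl (bfsStep cur)
              ((PySem.Dict.modify t cur [] (fun l => l ++ [c])).insert c [cur],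
                PySem.Set.add u c, acc ++ [c]) := by
        simp [bfsStep, hc]
      rw [hred]
      obtain ⟨ν, h1, h2, h3, h4⟩ :=
        ih ((PySem.Dict.modify t cur [] (fun l => l ++ [c])).insert c [cur])
          (PySem.Set.add u c) (acc ++ [c])
      refine ⟨c :: ν, by rw [h1]; simp, ?_, ?_, ?_⟩
      · rw [h2, bfsSet_toFinset_add]
        ext y
        simp only [Finset.mem_union, Finset.mem_insert, List.mem_toFinset, List.toFinset_cons]
        tauto
      · refine List.nodup_cons.2 ⟨fun hm => ?_, h3⟩
        exact (h4 c hm).2 ((PySem.Set.mem_add _ _ _).2 (Or.inr rfl))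
      · intro x hx
        rcases List.mem_cons.1 hx with rfl | hx
        · exact ⟨List.mem_cons_self, hc⟩
        · exact ⟨List.mem_cons_of_mem _ (h4 x hx).1,
            fun hm => (h4 x hx).2 ((PySem.Set.mem_add _ _ _).2 (Or.inl hm))⟩

lemma bfsMem_univ (g : PySem.Dict Int (List Int)) (cur x : Int)
    (hx : x ∈ PySem.Dict.getD g cur []) : x ∈ bfsUniv g := by
  rw [PySem.Dict.getD_eq_get?_getD] at hx
  cases h : PySem.Dict.get? g cur with
  | none => rw [h] at hx; simp at hx
  | some v =>
    rw [h] at hx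
    have hv : v ∈ g.values :=
      List.mem_map.2 ⟨(cur, v), PySem.Dict.mem_items_of_get?_eq_some g h, rfl⟩
    exact List.mem_toFinset.2 (List.mem_flatten.2 ⟨v, hv, hx⟩)

lemma bfsCard (U A B : Finset Int) (ν : List Int)
    (hsub : A ∪ ν.toFinset ⊆ B) (hnd : ν.Nodup) (hν : ν.toFinset ⊆ U \ A) :
    (U \ B).card + ν.length ≤ (U \ A).card := by
  have h1 : U \ B ⊆ (U \ A) \ ν.toFinset := by
    intro y hy
    simp only [Finset.mem_sdiff] at hy ⊢
    refine ⟨⟨hy.1, fun hA => hy.2 (hsub (Finset.mem_union_left _ hA))⟩,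
      fun hν' => hy.2 (hsub (Finset.mem_union_right _ hν'))⟩
  have h2 := Finset.card_le_card h1
  have h3 : ((U \ A) \ ν.toFinset).card = (U \ A).card - ν.toFinset.card := by
    rw [Finset.card_sdiff, Finset.inter_eq_left.2 hν]
  have h4 : ν.toFinset.card = ν.length := List.toFinset_card_of_nodup hnd
  have h5 := Finset.card_le_card hν
  have h6 : (U \ A).card ≤ U.card := Finset.card_le_card (Finset.sdiff_subset)
  omega

-- A's while-loop: pop one node from the front of the queue, append its new children
def bfsRunA (g : PySem.Dict Int (List Int)) (tree : PySem.Dict Int (List Int))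
    (used : PySem.Set Int) (queue : List Int) : PySem.Dict Int (List Int) :=
  match queue with
  | [] => tree
  | cur :: rest =>
    let used1 := PySem.Set.add used cur
    let s := bfsVisit g cur (tree, used1, [])
    bfsRunA g s.1 s.2.1 (rest ++ s.2.2)
termination_by (bfsUniv g \ used.toFinset).card + queue.length
decreasing_by
  obtain ⟨ν, h1, h2, h3, h4⟩ := bfsVisit_spec cur (PySem.Dict.getD g cur []) tree
    (PySem.Set.add used cur) []
  have hs2 : (bfsVisit g cur (tree, PySem.Set.add used cur, [])).2.2 = ν := by
    simpa [bfsVisit] using h1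
  have hfin : ((bfsVisit g cur (tree, PySem.Set.add used cur, [])).2.1).toFinset
      = (PySem.Set.add used cur).toFinset ∪ ν.toFinset := by
    simpa [bfsVisit] using h2
  have hcard : (bfsUniv g \ ((bfsVisit g cur (tree, PySem.Set.add used cur, [])).2.1).toFinset).card
      + ν.length ≤ (bfsUniv g \ used.toFinset).card := by
    refine bfsCard _ _ _ ν ?_ h3 ?_
    · rw [hfin, bfsSet_toFinset_add]
      intro y hy
      rcases Finset.mem_union.1 hy with h | h
      · exact Finset.mem_union_left _ (Finset.mem_insert_of_mem h)
      · exact Finset.mem_union_right _ h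
    · intro y hy
      rw [List.mem_toFinset] at hy
      refine Finset.mem_sdiff.2 ⟨bfsMem_univ g cur y (h4 y hy).1, ?_⟩
      intro hm
      exact (h4 y hy).2 ((PySem.Set.mem_add _ _ _).2 (Or.inl (List.mem_toFinset.1 hm)))
  have hlen : (rest ++ (bfsVisit g cur (tree, PySem.Set.add used cur, [])).2.2).length
      = rest.length + ν.length := by rw [hs2, List.length_append]
  simp only [List.length_cons]
  omega

def BFS (graph : List (Int × List Int)) (root : Int) : List (Int × List Int) :=
  let tree0 := (PySem.Dict.empty : PySem.Dict Int (List Int)).insert root [root]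
  (bfsRunA (PySem.Dict.ofList graph) tree0 PySem.Set.empty [root]).items

-- ===== PORT B =====
-- pass-1 inner body: 'for v in graph[u]: if v not in parent: parent[v]=u; order.append(v); nxt.append(v)'
def bfsStep1 (cur : Int)
    (st : PySem.Dict Int Int × List Int × List Int) (sub : Int) :
    PySem.Dict Int Int × List Int × List Int :=
  match st with
  | (parent, order, nxt) =>
    if parent.contains sub then (parent, order, nxt)
    else (parent.insert sub cur, order ++ [sub], nxt ++ [sub])

def bfsVisit1 (g : PySem.Dict Int (List Int)) (cur : Int)
    (st : PySem.Dict Int Int × List Int × List Int) :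
    PySem.Dict Int Int × List Int × List Int :=
  (PySem.Dict.getD g cur []).foldl (bfsStep1 cur) st

def bfsLevel1 (g : PySem.Dict Int (List Int))
    (st : PySem.Dict Int Int × List Int × List Int) (cur : Int) :
    PySem.Dict Int Int × List Int × List Int :=
  bfsVisit1 g cur st

-- termination lemmas for pass 1 (cited in decreasing_by)
-- (bfsUniv/bfsMem_univ are shared with A's port: they are termination-measure helpers only)
lemma bfsVisit1_spec (cur : Int) (l : List Int) (p : PySem.Dict Int Int)
    (o acc : List Int) :
    ∃ ν : List Int,
      (l.foldl (bfsStep1 cur) (p, o, acc)).2.2 = acc ++ ν ∧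
      ((l.foldl (bfsStep1 cur) (p, o, acc)).1).keys.toFinset = p.keys.toFinset ∪ ν.toFinset ∧
      ν.Nodup ∧ (∀ x ∈ ν, x ∈ l ∧ p.contains x = false) := by
  induction l generalizing p o acc with
  | nil => exact ⟨[], by simp⟩
  | cons c l ih =>
    by_cases hc : p.contains c = true
    · have hred : ((c :: l).foldl (bfsStep1 cur) (p, o, acc))
          = l.foldl (bfsStep1 cur) (p, o, acc) := by simp [bfsStep1, hc]
      rw [hred]
      obtain ⟨ν, h1, h2, h3, h4⟩ := ih p o acc
      exact ⟨ν, h1, h2, h3,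
        fun x hx => ⟨List.mem_cons_of_mem _ (h4 x hx).1, (h4 x hx).2⟩⟩
    · rw [Bool.not_eq_true] at hc
      have hred : ((c :: l).foldl (bfsStep1 cur) (p, o, acc))
          = l.foldl (bfsStep1 cur) (p.insert c cur, o ++ [c], acc ++ [c]) := by
        simp [bfsStep1, hc]
      rw [hred]
      obtain ⟨ν, h1, h2, h3, h4⟩ := ih (p.insert c cur) (o ++ [c]) (acc ++ [c])
      refine ⟨c :: ν, by rw [h1]; simp, ?_, ?_, ?_⟩
      · rw [h2, PySem.Dict.keys_insert_of_not_contains p cur hc]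
        ext y
        simp only [List.toFinset_append, Finset.mem_union, List.mem_toFinset,
          List.toFinset_cons, List.toFinset_nil, insert_empty_eq, Finset.mem_insert,
          Finset.mem_singleton]
        tauto
      · refine List.nodup_cons.2 ⟨fun hm => ?_, h3⟩
        have := (h4 c hm).2
        rw [PySem.Dict.contains_insert] at this
        simp at this
      · intro x hx
        rcases List.mem_cons.1 hx with rfl | hx
        · exact ⟨List.mem_cons_self, hc⟩
        · refine ⟨List.mem_cons_of_mem _ (h4 x hx).1, ?_⟩
          have := (h4 x hx).2
          rw [PySem.Dict.contains_insert] at this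
          simp only [Bool.or_eq_false_iff] at this
          exact this.2

lemma bfsLevel1_spec (g : PySem.Dict Int (List Int)) (fr : List Int)
    (p : PySem.Dict Int Int) (o acc : List Int) :
    ∃ ν : List Int,
      (fr.foldl (bfsLevel1 g) (p, o, acc)).2.2 = acc ++ ν ∧
      ((fr.foldl (bfsLevel1 g) (p, o, acc)).1).keys.toFinset = p.keys.toFinset ∪ ν.toFinset ∧
      ν.Nodup ∧ (∀ x ∈ ν, x ∈ bfsUniv g ∧ p.contains x = false) := by
  induction fr generalizing p o acc with
  | nil => exact ⟨[], by simp⟩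
  | cons c fr ih =>
    obtain ⟨ν1, g1, g2, g3, g4⟩ := bfsVisit1_spec c (PySem.Dict.getD g c []) p o acc
    have hstep : (c :: fr).foldl (bfsLevel1 g) (p, o, acc)
        = fr.foldl (bfsLevel1 g) (bfsVisit1 g c (p, o, acc)) := by
      simp [bfsLevel1]
    obtain ⟨ν2, k1, k2, k3, k4⟩ := ih (bfsVisit1 g c (p, o, acc)).1
      (bfsVisit1 g c (p, o, acc)).2.1 (bfsVisit1 g c (p, o, acc)).2.2
    rw [hstep]
    have heta : (bfsVisit1 g c (p, o, acc)) = ((bfsVisit1 g c (p, o, acc)).1,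
        (bfsVisit1 g c (p, o, acc)).2.1, (bfsVisit1 g c (p, o, acc)).2.2) := rfl
    refine ⟨ν1 ++ ν2, ?_, ?_, ?_, ?_⟩
    · rw [← heta] at k1
      rw [k1, show (bfsVisit1 g c (p, o, acc)).2.2 = acc ++ ν1 from g1, List.append_assoc]
    · rw [← heta] at k2
      rw [k2, show ((bfsVisit1 g c (p, o, acc)).1).keys.toFinset
          = p.keys.toFinset ∪ ν1.toFinset from g2]
      simp [List.toFinset_append, Finset.union_assoc]
    · refine List.Nodup.append g3 k3 ?_
      intro x hx1 hx2
      have hin : ((bfsVisit1 g c (p, o, acc)).1).contains x = true := by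
        rw [PySem.Dict.contains_iff_mem_keys]
        have : x ∈ ((bfsVisit1 g c (p, o, acc)).1).keys.toFinset := by
          rw [show ((bfsVisit1 g c (p, o, acc)).1).keys.toFinset
              = p.keys.toFinset ∪ ν1.toFinset from g2]
          exact Finset.mem_union_right _ (List.mem_toFinset.2 hx1)
        exact List.mem_toFinset.1 this
      rw [(k4 x hx2).2] at hin
      cases hin
    · intro x hx
      rcases List.mem_append.1 hx with h | h
      · exact ⟨bfsMem_univ g c x (g4 x h).1, (g4 x h).2⟩
      · refine ⟨(k4 x h).1, ?_⟩
        by_contra hcon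
        rw [Bool.not_eq_false] at hcon
        have hin : ((bfsVisit1 g c (p, o, acc)).1).contains x = true := by
          rw [PySem.Dict.contains_iff_mem_keys]
          have : x ∈ ((bfsVisit1 g c (p, o, acc)).1).keys.toFinset := by
            rw [show ((bfsVisit1 g c (p, o, acc)).1).keys.toFinset
                = p.keys.toFinset ∪ ν1.toFinset from g2]
            exact Finset.mem_union_left _
              (List.mem_toFinset.2 ((PySem.Dict.contains_iff_mem_keys _ _).1 hcon))
          exact List.mem_toFinset.1 this
        rw [(k4 x h).2] at hin
        cases hin

-- pass-1 while-loop: process the whole level, recurse on the collected next level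
def bfsRun1 (g : PySem.Dict Int (List Int)) (parent : PySem.Dict Int Int)
    (order : List Int) (level : List Int) : PySem.Dict Int Int × List Int :=
  match level with
  | [] => (parent, order)
  | cur :: rest =>
    let s := (cur :: rest).foldl (bfsLevel1 g) (parent, order, ([] : List Int))
    bfsRun1 g s.1 s.2.1 s.2.2
termination_by 2 * (bfsUniv g \ parent.keys.toFinset).card + (if level.isEmpty then 0 else 1)
decreasing_by
  obtain ⟨ν, h1, h2, h3, h4⟩ := bfsLevel1_spec g (cur :: rest) parent order []
  have hs2 : ((cur :: rest).foldl (bfsLevel1 g) (parent, order, ([] : List Int))).2.2 = ν := by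
    simpa using h1
  rcases eq_or_ne ν [] with rfl | hν
  · have hfin : (((cur :: rest).foldl (bfsLevel1 g) (parent, order, ([] : List Int))).1).keys.toFinset
        = parent.keys.toFinset := by simpa using h2
    simp only [List.foldl_cons] at hs2 hfin
    simp [hs2, hfin]
  · have hcard : (bfsUniv g \ (((cur :: rest).foldl (bfsLevel1 g) (parent, order, ([] : List Int))).1).keys.toFinset).card
        + ν.length ≤ (bfsUniv g \ parent.keys.toFinset).card := by
      refine bfsCard _ _ _ ν (by rw [h2]) h3 ?_
      intro y hy
      rw [List.mem_toFinset] at hy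
      refine Finset.mem_sdiff.2 ⟨(h4 y hy).1, fun hm => ?_⟩
      have := (h4 y hy).2
      rw [(PySem.Dict.contains_iff_mem_keys _ _).2 (List.mem_toFinset.1 hm)] at this
      cases this
    have hlen : 0 < ν.length := List.length_pos_iff.2 hν
    have hle : (if (((cur :: rest).foldl (bfsLevel1 g) (parent, order, ([] : List Int))).2.2).isEmpty
        then 0 else 1) ≤ 1 := by split <;> omega
    simp only [List.isEmpty_cons, if_false, Bool.false_eq_true]
    omega

def BFS_alt (graph : List (Int × List Int)) (root : Int) : List (Int × List Int) :=
  let g := PySem.Dict.ofList graph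
  -- pass 1: parent = {root: root}, order = [root], level = [root]; level-synchronous sweep
  let r := bfsRun1 g ((PySem.Dict.empty : PySem.Dict Int Int).insert root root) [root] [root]
  -- pass 2: children.setdefault(parent[w], []).append(w) for w in order[1:]
  -- (parent[w] ported as getD r.1 w w: every w in order is a key of parent, so the default is never read)
  let children := (r.2.drop 1).foldl
    (fun d w => PySem.Dict.modify d (PySem.Dict.getD r.1 w w) [] (fun l => l ++ [w]))
    (PySem.Dict.empty : PySem.Dict Int (List Int))
  -- final dict comprehension {v: [parent[v]] + children.get(v, []) for v in order}
  (r.2.foldl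
    (fun d v => d.insert v (PySem.Dict.getD r.1 v v :: PySem.Dict.getD children v []))
    (PySem.Dict.empty : PySem.Dict Int (List Int))).items

-- ===== PRECONDITION & SPEC =====
-- the set of nodes reachable from root (neighbour expansion to a fixpoint; any node at
-- distance d from root has d predecessors that are distinct keys, so graph.length + 1
-- expansion rounds reach every reachable node)
def bfsReach (graph : List (Int × List Int)) (root : Int) : List Int :=
  (fun S => PySem.Set.update S
    (S.flatMap (fun v => PySem.Dict.getD (PySem.Dict.ofList graph) v [])))^[graph.length + 1]
    [root]

-- Python A raises KeyError exactly when some node reachable from root (root included) is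
-- not a key of graph; Pre_ admits precisely the KeyError-free inputs.
def Pre_BFS (graph : List (Int × List Int)) (root : Int) : Prop :=
  ∀ v ∈ bfsReach graph root, v ∈ graph.map Prod.fst
instance (graph : List (Int × List Int)) (root : Int) : Decidable (Pre_BFS graph root) := by
  unfold Pre_BFS; infer_instance

def pvWitness_BFS : (List (Int × List Int)) × Int := ([(0, [1, 2]), (1, [0]), (2, [])], 0)

def Spec_BFS (graph : List (Int × List Int)) (root : Int) (out : List (Int × List Int)) : Prop := out = BFS_alt graph root
instance (graph : List (Int × List Int)) (root : Int) (out : List (Int × List Int)) : Decidable (Spec_BFS graph root out) := by unfold Spec_BFS; infer_instance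

-- ===== CLAIM (what is proved, stated in full; the proofs are below) =====
def Claim_equal_BFS : Prop := ∀ (graph : List (Int × List Int)) (root : Int), Dom_BFS graph root → Pre_BFS graph root → Spec_BFS graph root (BFS graph root)

-- ===== LEMMAS AND PROOFS =====

-- proof-side reformulation of A's loop: a level-synchronous run that still carries the
-- tree (bridge between A's queue run and B's pass-1 run)
def bfsLevel (g : PySem.Dict Int (List Int))
    (st : PySem.Dict Int (List Int) × PySem.Set Int × List Int) (cur : Int) :
    PySem.Dict Int (List Int) × PySem.Set Int × List Int :=
  bfsVisit g cur st

lemma bfsLevel_spec (g : PySem.Dict Int (List Int)) (fr : List Int)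
    (t : PySem.Dict Int (List Int)) (u : PySem.Set Int) (acc : List Int) :
    ∃ ν : List Int,
      (fr.foldl (bfsLevel g) (t, u, acc)).2.2 = acc ++ ν ∧
      ((fr.foldl (bfsLevel g) (t, u, acc)).2.1).toFinset = u.toFinset ∪ ν.toFinset ∧
      ν.Nodup ∧ (∀ x ∈ ν, x ∈ bfsUniv g ∧ x ∉ u) := by
  induction fr generalizing t u acc with
  | nil => exact ⟨[], by simp⟩
  | cons c fr ih =>
    obtain ⟨ν1, g1, g2, g3, g4⟩ := bfsVisit_spec c (PySem.Dict.getD g c []) t u acc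
    have hstep : (c :: fr).foldl (bfsLevel g) (t, u, acc)
        = fr.foldl (bfsLevel g) (bfsVisit g c (t, u, acc)) := by
      simp [bfsLevel]
    obtain ⟨ν2, k1, k2, k3, k4⟩ := ih (bfsVisit g c (t, u, acc)).1
      (bfsVisit g c (t, u, acc)).2.1 (bfsVisit g c (t, u, acc)).2.2
    rw [hstep]
    have heta : (bfsVisit g c (t, u, acc)) = ((bfsVisit g c (t, u, acc)).1,
        (bfsVisit g c (t, u, acc)).2.1, (bfsVisit g c (t, u, acc)).2.2) := rfl
    refine ⟨ν1 ++ ν2, ?_, ?_, ?_, ?_⟩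
    · rw [← heta] at k1
      rw [k1]
      rw [show (bfsVisit g c (t, u, acc)).2.2 = acc ++ ν1 from g1, List.append_assoc]
    · rw [← heta] at k2
      rw [k2]
      rw [show ((bfsVisit g c (t, u, acc)).2.1).toFinset = u.toFinset ∪ ν1.toFinset from g2]
      simp [List.toFinset_append, Finset.union_assoc]
    · refine List.Nodup.append g3 k3 ?_
      intro x hx1 hx2
      have hin : x ∈ (bfsVisit g c (t, u, acc)).2.1 := by
        have : x ∈ ((bfsVisit g c (t, u, acc)).2.1).toFinset := by
          rw [show ((bfsVisit g c (t, u, acc)).2.1).toFinset = u.toFinset ∪ ν1.toFinset from g2]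
          exact Finset.mem_union_right _ (List.mem_toFinset.2 hx1)
        exact List.mem_toFinset.1 this
      exact (k4 x hx2).2 hin
    · intro x hx
      rcases List.mem_append.1 hx with h | h
      · exact ⟨bfsMem_univ g c x (g4 x h).1, (g4 x h).2⟩
      · refine ⟨(k4 x h).1, fun hm => (k4 x h).2 ?_⟩
        have : x ∈ ((bfsVisit g c (t, u, acc)).2.1).toFinset := by
          rw [show ((bfsVisit g c (t, u, acc)).2.1).toFinset = u.toFinset ∪ ν1.toFinset from g2]
          exact Finset.mem_union_left _ (List.mem_toFinset.2 hm)
        exact List.mem_toFinset.1 this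

def bfsRunB (g : PySem.Dict Int (List Int)) (tree : PySem.Dict Int (List Int))
    (used : PySem.Set Int) (frontier : List Int) : PySem.Dict Int (List Int) :=
  match frontier with
  | [] => tree
  | cur :: rest =>
    let s := (cur :: rest).foldl (bfsLevel g) (tree, used, ([] : List Int))
    bfsRunB g s.1 s.2.1 s.2.2
termination_by 2 * (bfsUniv g \ used.toFinset).card + (if frontier.isEmpty then 0 else 1)
decreasing_by
  obtain ⟨ν, h1, h2, h3, h4⟩ := bfsLevel_spec g (cur :: rest) tree used []
  have hs2 : ((cur :: rest).foldl (bfsLevel g) (tree, used, ([] : List Int))).2.2 = ν := by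
    simpa using h1
  rcases eq_or_ne ν [] with rfl | hν
  · have hfin : (((cur :: rest).foldl (bfsLevel g) (tree, used, ([] : List Int))).2.1).toFinset
        = used.toFinset := by simpa using h2
    simp only [List.foldl_cons] at hs2 hfin
    simp [hs2, hfin]
  · have hcard : (bfsUniv g \ (((cur :: rest).foldl (bfsLevel g) (tree, used, ([] : List Int))).2.1).toFinset).card
        + ν.length ≤ (bfsUniv g \ used.toFinset).card := by
      refine bfsCard _ _ _ ν (by rw [h2]) h3 ?_
      intro y hy
      rw [List.mem_toFinset] at hy
      exact Finset.mem_sdiff.2 ⟨(h4 y hy).1, fun hm => (h4 y hy).2 (List.mem_toFinset.1 hm)⟩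
    have hlen : 0 < ν.length := List.length_pos_iff.2 hν
    have hle : (if (((cur :: rest).foldl (bfsLevel g) (tree, used, ([] : List Int))).2.2).isEmpty
        then 0 else 1) ≤ 1 := by split <;> omega
    simp only [List.isEmpty_cons, if_false, Bool.false_eq_true]
    omega

-- unfolding equations for the three loops
lemma bfsRunA_nil (g t : PySem.Dict Int (List Int)) (u : PySem.Set Int) :
    bfsRunA g t u [] = t := by rw [bfsRunA]

lemma bfsRunA_cons (g t : PySem.Dict Int (List Int)) (u : PySem.Set Int) (cur : Int)
    (rest : List Int) :
    bfsRunA g t u (cur :: rest) =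
      bfsRunA g (bfsVisit g cur (t, PySem.Set.add u cur, [])).1
        (bfsVisit g cur (t, PySem.Set.add u cur, [])).2.1
        (rest ++ (bfsVisit g cur (t, PySem.Set.add u cur, [])).2.2) := by
  rw [bfsRunA]

lemma bfsRunB_nil (g t : PySem.Dict Int (List Int)) (u : PySem.Set Int) :
    bfsRunB g t u [] = t := by rw [bfsRunB]

lemma bfsRunB_cons (g t : PySem.Dict Int (List Int)) (u : PySem.Set Int) (cur : Int)
    (rest : List Int) :
    bfsRunB g t u (cur :: rest) =
      bfsRunB g ((cur :: rest).foldl (bfsLevel g) (t, u, [])).1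
        ((cur :: rest).foldl (bfsLevel g) (t, u, [])).2.1
        ((cur :: rest).foldl (bfsLevel g) (t, u, [])).2.2 := by
  rw [bfsRunB]

lemma bfsRun1_nil (g : PySem.Dict Int (List Int)) (p : PySem.Dict Int Int) (o : List Int) :
    bfsRun1 g p o [] = (p, o) := by rw [bfsRun1]

lemma bfsRun1_cons (g : PySem.Dict Int (List Int)) (p : PySem.Dict Int Int) (o : List Int)
    (cur : Int) (rest : List Int) :
    bfsRun1 g p o (cur :: rest) =
      bfsRun1 g ((cur :: rest).foldl (bfsLevel1 g) (p, o, [])).1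
        ((cur :: rest).foldl (bfsLevel1 g) (p, o, [])).2.1
        ((cur :: rest).foldl (bfsLevel1 g) (p, o, [])).2.2 := by
  rw [bfsRun1]

-- the third state component is a pure accumulator
lemma bfsVisit_acc (cur : Int) (l : List Int) (t : PySem.Dict Int (List Int))
    (u : PySem.Set Int) (acc : List Int) :
    l.foldl (bfsStep cur) (t, u, acc) =
      ((l.foldl (bfsStep cur) (t, u, [])).1, (l.foldl (bfsStep cur) (t, u, [])).2.1,
        acc ++ (l.foldl (bfsStep cur) (t, u, [])).2.2) := by
  induction l generalizing t u acc with
  | nil => simp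
  | cons c l ih =>
    by_cases hc : c ∈ u
    · have h1 : bfsStep cur (t, u, acc) c = (t, u, acc) := by simp [bfsStep, hc]
      have h2 : bfsStep cur (t, u, []) c = (t, u, ([] : List Int)) := by simp [bfsStep, hc]
      simp only [List.foldl_cons, h1, h2]
      exact ih t u acc
    · have h1 : bfsStep cur (t, u, acc) c =
          ((PySem.Dict.modify t cur [] (fun l => l ++ [c])).insert c [cur],
            PySem.Set.add u c, acc ++ [c]) := by simp [bfsStep, hc]
      have h2 : bfsStep cur (t, u, []) c =
          ((PySem.Dict.modify t cur [] (fun l => l ++ [c])).insert c [cur],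
            PySem.Set.add u c, ([c] : List Int)) := by simp [bfsStep, hc]
      simp only [List.foldl_cons, h1, h2]
      rw [ih _ _ (acc ++ [c]), ih _ _ [c]]
      simp

lemma bfsLevel_acc (g : PySem.Dict Int (List Int)) (fr : List Int)
    (t : PySem.Dict Int (List Int)) (u : PySem.Set Int) (acc : List Int) :
    fr.foldl (bfsLevel g) (t, u, acc) =
      ((fr.foldl (bfsLevel g) (t, u, [])).1, (fr.foldl (bfsLevel g) (t, u, [])).2.1,
        acc ++ (fr.foldl (bfsLevel g) (t, u, [])).2.2) := by
  induction fr generalizing t u acc with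
  | nil => simp
  | cons c fr ih =>
    have h1 : bfsLevel g (t, u, acc) c =
        ((bfsVisit g c (t, u, [])).1, (bfsVisit g c (t, u, [])).2.1,
          acc ++ (bfsVisit g c (t, u, [])).2.2) :=
      bfsVisit_acc c (PySem.Dict.getD g c []) t u acc
    have h2 : bfsLevel g (t, u, []) c = bfsVisit g c (t, u, []) := rfl
    simp only [List.foldl_cons, h1, h2]
    rw [ih _ _ (acc ++ (bfsVisit g c (t, u, [])).2.2)]
    rw [show (bfsVisit g c (t, u, [])) = ((bfsVisit g c (t, u, [])).1,
      (bfsVisit g c (t, u, [])).2.1, (bfsVisit g c (t, u, [])).2.2) from rfl,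
      ih _ _ (bfsVisit g c (t, u, [])).2.2]
    simp

-- everything ever in used stays in used
lemma bfsVisit_used_mono (g : PySem.Dict Int (List Int)) (cur : Int)
    (t : PySem.Dict Int (List Int)) (u : PySem.Set Int) (acc : List Int) (x : Int)
    (hx : x ∈ u) : x ∈ (bfsVisit g cur (t, u, acc)).2.1 := by
  obtain ⟨ν, _, h2, _, _⟩ := bfsVisit_spec cur (PySem.Dict.getD g cur []) t u acc
  have : x ∈ ((bfsVisit g cur (t, u, acc)).2.1).toFinset := by
    have h2' : ((bfsVisit g cur (t, u, acc)).2.1).toFinset = u.toFinset ∪ ν.toFinset := h2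
    rw [h2']
    exact Finset.mem_union_left _ (List.mem_toFinset.2 hx)
  exact List.mem_toFinset.1 this

-- ONE pop of A's queue-loop per frontier node = one whole level, new nodes after `rest`
lemma bfsRunA_level (g : PySem.Dict Int (List Int)) (fr : List Int) :
    ∀ (t : PySem.Dict Int (List Int)) (u : PySem.Set Int) (rest : List Int),
      (∀ x ∈ fr, x ∈ u) →
      bfsRunA g t u (fr ++ rest) =
        bfsRunA g (fr.foldl (bfsLevel g) (t, u, [])).1
          (fr.foldl (bfsLevel g) (t, u, [])).2.1
          (rest ++ (fr.foldl (bfsLevel g) (t, u, [])).2.2) := by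
  induction fr with
  | nil => intro t u rest _; simp
  | cons c fr ih =>
    intro t u rest h
    have hc : PySem.Set.add u c = u := PySem.Set.add_of_mem (h c List.mem_cons_self)
    have hstep : bfsRunA g t u ((c :: fr) ++ rest) =
        bfsRunA g (bfsVisit g c (t, u, [])).1 (bfsVisit g c (t, u, [])).2.1
          (fr ++ (rest ++ (bfsVisit g c (t, u, [])).2.2)) := by
      rw [List.cons_append, bfsRunA_cons, hc, List.append_assoc]
    rw [hstep, ih _ _ _ (fun x hx => bfsVisit_used_mono g c t u [] x (h x (List.mem_cons_of_mem _ hx)))]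
    have hfold : (c :: fr).foldl (bfsLevel g) (t, u, []) =
        ((fr.foldl (bfsLevel g) ((bfsVisit g c (t, u, [])).1, (bfsVisit g c (t, u, [])).2.1, [])).1,
         (fr.foldl (bfsLevel g) ((bfsVisit g c (t, u, [])).1, (bfsVisit g c (t, u, [])).2.1, [])).2.1,
         (bfsVisit g c (t, u, [])).2.2 ++
           (fr.foldl (bfsLevel g) ((bfsVisit g c (t, u, [])).1, (bfsVisit g c (t, u, [])).2.1, [])).2.2) := by
      rw [List.foldl_cons,
        show bfsLevel g (t, u, []) c = ((bfsVisit g c (t, u, [])).1,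
          (bfsVisit g c (t, u, [])).2.1, (bfsVisit g c (t, u, [])).2.2) from rfl,
        bfsLevel_acc]
    rw [hfold, List.append_assoc]

-- A's queue run equals the level-synchronous run once every queued node is already used
lemma bfsRun_eq (g : PySem.Dict Int (List Int)) :
    ∀ (n : Nat) (t : PySem.Dict Int (List Int)) (u : PySem.Set Int) (fr : List Int),
      2 * (bfsUniv g \ u.toFinset).card + fr.length ≤ n → (∀ x ∈ fr, x ∈ u) →
      bfsRunA g t u fr = bfsRunB g t u fr := by
  intro n
  induction n with
  | zero =>
    intro t u fr hle _
    have : fr = [] := List.eq_nil_of_length_eq_zero (by omega)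
    rw [this, bfsRunA_nil, bfsRunB_nil]
  | succ n ih =>
    intro t u fr hle h
    cases fr with
    | nil => rw [bfsRunA_nil, bfsRunB_nil]
    | cons c rest =>
      obtain ⟨ν, h1, h2, h3, h4⟩ := bfsLevel_spec g (c :: rest) t u []
      have h1' : ((c :: rest).foldl (bfsLevel g) (t, u, [])).2.2 = ν := by simpa using h1
      have hL := bfsRunA_level g (c :: rest) t u [] h
      rw [List.append_nil] at hL
      rw [List.nil_append] at hL
      rw [hL, bfsRunB_cons]
      have hcard : (bfsUniv g \ (((c :: rest).foldl (bfsLevel g) (t, u, [])).2.1).toFinset).card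
          + ν.length ≤ (bfsUniv g \ u.toFinset).card := by
        refine bfsCard _ _ _ ν (by rw [h2]) h3 ?_
        intro y hy
        rw [List.mem_toFinset] at hy
        exact Finset.mem_sdiff.2 ⟨(h4 y hy).1, fun hm => (h4 y hy).2 (List.mem_toFinset.1 hm)⟩
      refine ih _ _ _ ?_ ?_
      · rw [h1']
        simp only [List.length_cons] at hle
        omega
      · intro x hx
        rw [h1'] at hx
        have : x ∈ (((c :: rest).foldl (bfsLevel g) (t, u, [])).2.1).toFinset := by
          rw [h2]
          exact Finset.mem_union_right _ (List.mem_toFinset.2 hx)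
        exact List.mem_toFinset.1 this

-- the coupling invariant between the tree-carrying level run and pass 1's parent/order run
def bfsCoupled (t : PySem.Dict Int (List Int)) (u : PySem.Set Int)
    (p : PySem.Dict Int Int) (o : List Int) : Prop :=
  (∀ x : Int, x ∈ u ↔ p.contains x = true) ∧
  t.keys = o ∧
  (∀ v ∈ o, t.getD v [] =
    p.getD v v :: (o.drop 1).filter (fun w => p.get? w == some v)) ∧
  o.Nodup ∧
  (∀ w ∈ o, p.contains w = true) ∧
  (∀ x : Int, p.contains x = true → x ∈ o) ∧
  o ≠ [] ∧
  (∀ w a : Int, p.get? w = some a → p.contains a = true)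

-- one fresh discovery preserves the coupling
lemma bfsStepSim (cur c : Int) (t : PySem.Dict Int (List Int)) (u : PySem.Set Int)
    (p : PySem.Dict Int Int) (o : List Int)
    (h : bfsCoupled t u p o) (hcur : cur ∈ o) (hc : p.contains c = false) :
    bfsCoupled ((PySem.Dict.modify t cur [] (fun l => l ++ [c])).insert c [cur])
      (PySem.Set.add u c) (p.insert c cur) (o ++ [c]) := by
  obtain ⟨h1, h2, h3, h4, h5, h6, h9, h10⟩ := h
  have hco : c ∉ o := fun hm => by rw [h5 c hm] at hc; cases hc
  have hcurne : cur ≠ c := fun he => hco (he ▸ hcur)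
  have htc : t.contains c = false := by
    rw [← Bool.not_eq_true, PySem.Dict.contains_iff_mem_keys, h2]
    exact hco
  have htcur : t.contains cur = true := (PySem.Dict.contains_iff_mem_keys t cur).2 (h2 ▸ hcur)
  obtain ⟨hd, tl, rfl⟩ := List.exists_cons_of_ne_nil h9
  have hdrop : ((hd :: tl) ++ [c]).drop 1 = tl ++ [c] := by simp
  refine ⟨?_, ?_, ?_, ?_, ?_, ?_, by simp, ?_⟩
  · intro x
    rw [PySem.Set.mem_add, PySem.Dict.contains_insert]
    constructor
    · rintro (hx | rfl)
      · simp [(h1 x).1 hx]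
      · simp
    · intro hx
      rcases Bool.or_eq_true_iff.1 hx with hx | hx
      · exact Or.inr (by simpa using hx)
      · exact Or.inl ((h1 x).2 hx)
  · have hkm : (PySem.Dict.modify t cur [] (fun l => l ++ [c])).keys = t.keys := by
      rw [PySem.Dict.keys_modify, PySem.Dict.keys_insert_of_contains _ _ htcur]
    have hmc : (PySem.Dict.modify t cur [] (fun l => l ++ [c])).contains c = false := by
      rw [PySem.Dict.contains_modify]
      simp only [Bool.or_eq_false_iff]
      exact ⟨by simp [Ne.symm hcurne], htc⟩
    rw [PySem.Dict.keys_insert_of_not_contains _ [cur] hmc, hkm, h2]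
  · intro v hv
    have hgv : ((PySem.Dict.modify t cur [] (fun l => l ++ [c])).insert c [cur]).getD v []
        = if v = c then [cur]
          else if v = cur then t.getD cur [] ++ [c] else t.getD v [] := by
      rw [PySem.Dict.getD_insert, PySem.Dict.getD_modify]
    have hpv : (p.insert c cur).getD v v = if v = c then cur else p.getD v v := by
      rw [PySem.Dict.getD_insert]
    have hfilter : ∀ x : Int,
        ((hd :: tl ++ [c]).drop 1).filter (fun w => (p.insert c cur).get? w == some x)
          = tl.filter (fun w => p.get? w == some x)
            ++ (if cur = x then [c] else []) := by
      intro x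
      have hd1 : (hd :: tl ++ [c]).drop 1 = tl ++ [c] := by simp
      rw [hd1, List.filter_append]
      congr 1
      · refine List.filter_congr ?_
        intro w hw
        have hwo : w ∈ hd :: tl := List.mem_cons_of_mem _ hw
        have hwc : w ≠ c := fun he => hco (he ▸ hwo)
        rw [PySem.Dict.get?_insert]
        simp [hwc]
      · have hgc : (p.insert c cur).get? c = some cur := by
          rw [PySem.Dict.get?_insert]; simp
        simp only [List.filter_cons, List.filter_nil, hgc]
        by_cases hx : cur = x
        · simp [hx]
        · simp [hx]
    rcases List.mem_append.1 hv with hv | hv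
    · -- old vertex
      have hvc : v ≠ c := fun he => hco (he ▸ hv)
      have h3v := h3 v hv
      simp only [List.drop_one, List.tail_cons] at h3v
      rw [hgv, hpv, hfilter v]
      simp only [if_neg hvc]
      by_cases hvcur : v = cur
      · subst hvcur
        rw [if_pos rfl, h3v]
        simp
      · rw [if_neg hvcur, h3v,
          if_neg (fun he : cur = v => hvcur he.symm), List.append_nil]
    · -- the new vertex c
      have hvc : v = c := by simpa using hv
      subst hvc
      rw [hgv, hpv, if_pos rfl, if_pos rfl, hfilter v]
      have htl : tl.filter (fun w => p.get? w == some v) = [] := by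
        refine List.filter_eq_nil_iff.2 ?_
        intro w hw
        cases hpw : p.get? w with
        | none => simp
        | some a =>
          have ha := h10 w a hpw
          have hac : a ≠ v := fun he => by rw [he, hc] at ha; cases ha
          simp [hac]
      rw [htl, if_neg hcurne]
      simp
  · refine List.Nodup.append h4 (List.nodup_singleton c) ?_
    intro x hx1 hx2
    have : x = c := by simpa using hx2
    exact hco (this ▸ hx1)
  · intro w hw
    rw [PySem.Dict.contains_insert]
    rcases List.mem_append.1 hw with hw | hw
    · simp [h5 w hw]
    · have : w = c := by simpa using hw
      simp [this]
  · intro x hx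
    rw [PySem.Dict.contains_insert] at hx
    rcases Bool.or_eq_true_iff.1 hx with hx | hx
    · exact List.mem_append.2 (Or.inr (by simpa using hx))
    · exact List.mem_append.2 (Or.inl (h6 x hx))
  · intro w a hwa
    rw [PySem.Dict.get?_insert] at hwa
    rw [PySem.Dict.contains_insert]
    by_cases hwc : w = c
    · rw [if_pos hwc] at hwa
      have ha : a = cur := by simpa using hwa.symm
      simp [ha, h5 cur hcur]
    · rw [if_neg hwc] at hwa
      simp [h10 w a hwa]

-- the inner fold over one adjacency list keeps the two runs coupled
lemma bfsInnerSim (cur : Int) (l : List Int) :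
    ∀ (t : PySem.Dict Int (List Int)) (u : PySem.Set Int) (p : PySem.Dict Int Int)
      (o nx : List Int),
      bfsCoupled t u p o → cur ∈ o →
      bfsCoupled (l.foldl (bfsStep cur) (t, u, nx)).1
          (l.foldl (bfsStep cur) (t, u, nx)).2.1
          (l.foldl (bfsStep1 cur) (p, o, nx)).1
          (l.foldl (bfsStep1 cur) (p, o, nx)).2.1 ∧
        (l.foldl (bfsStep cur) (t, u, nx)).2.2 = (l.foldl (bfsStep1 cur) (p, o, nx)).2.2 ∧
        ∃ ν : List Int, (l.foldl (bfsStep1 cur) (p, o, nx)).2.1 = o ++ ν ∧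
          (l.foldl (bfsStep1 cur) (p, o, nx)).2.2 = nx ++ ν := by
  induction l with
  | nil => intro t u p o nx h _; exact ⟨h, rfl, [], by simp, by simp⟩
  | cons c l ih =>
    intro t u p o nx h hcur
    by_cases hc : p.contains c = true
    · have hcu : c ∈ u := (h.1 c).2 hc
      have e1 : bfsStep cur (t, u, nx) c = (t, u, nx) := by simp [bfsStep, hcu]
      have e2 : bfsStep1 cur (p, o, nx) c = (p, o, nx) := by simp [bfsStep1, hc]
      simp only [List.foldl_cons, e1, e2]
      exact ih t u p o nx h hcur
    · rw [Bool.not_eq_true] at hc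
      have hcu : c ∉ u := fun hm => by rw [(h.1 c).1 hm] at hc; cases hc
      have e1 : bfsStep cur (t, u, nx) c =
          ((PySem.Dict.modify t cur [] (fun l => l ++ [c])).insert c [cur],
            PySem.Set.add u c, nx ++ [c]) := by simp [bfsStep, hcu]
      have e2 : bfsStep1 cur (p, o, nx) c =
          (p.insert c cur, o ++ [c], nx ++ [c]) := by simp [bfsStep1, hc]
      simp only [List.foldl_cons, e1, e2]
      have h' := bfsStepSim cur c t u p o h hcur hc
      have hcur' : cur ∈ o ++ [c] := List.mem_append.2 (Or.inl hcur)
      obtain ⟨k1, k2, ν, k3, k4⟩ := ih _ _ _ _ _ h' hcur'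
      refine ⟨k1, k2, c :: ν, ?_, ?_⟩
      · rw [k3, List.append_assoc]; rfl
      · rw [k4, List.append_assoc]; rfl

-- one whole level keeps the two runs coupled and produces identical next frontiers
lemma bfsLevelSim (g : PySem.Dict Int (List Int)) (fr : List Int) :
    ∀ (t : PySem.Dict Int (List Int)) (u : PySem.Set Int) (p : PySem.Dict Int Int)
      (o nx : List Int),
      bfsCoupled t u p o → (∀ x ∈ fr, x ∈ o) →
      bfsCoupled (fr.foldl (bfsLevel g) (t, u, nx)).1
          (fr.foldl (bfsLevel g) (t, u, nx)).2.1
          (fr.foldl (bfsLevel1 g) (p, o, nx)).1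
          (fr.foldl (bfsLevel1 g) (p, o, nx)).2.1 ∧
        (fr.foldl (bfsLevel g) (t, u, nx)).2.2 = (fr.foldl (bfsLevel1 g) (p, o, nx)).2.2 ∧
        ∃ ν : List Int, (fr.foldl (bfsLevel1 g) (p, o, nx)).2.1 = o ++ ν ∧
          (fr.foldl (bfsLevel1 g) (p, o, nx)).2.2 = nx ++ ν := by
  induction fr with
  | nil => intro t u p o nx h _; exact ⟨h, rfl, [], by simp, by simp⟩
  | cons c fr ih =>
    intro t u p o nx h hfr
    have e1 : (c :: fr).foldl (bfsLevel g) (t, u, nx)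
        = fr.foldl (bfsLevel g) (bfsVisit g c (t, u, nx)) := by simp [bfsLevel]
    have e2 : (c :: fr).foldl (bfsLevel1 g) (p, o, nx)
        = fr.foldl (bfsLevel1 g) (bfsVisit1 g c (p, o, nx)) := by simp [bfsLevel1]
    rw [e1, e2]
    obtain ⟨k1, k2, ν1, k3, k4⟩ :=
      bfsInnerSim c (PySem.Dict.getD g c []) t u p o nx h (hfr c List.mem_cons_self)
    have hetaB : bfsVisit g c (t, u, nx) = ((bfsVisit g c (t, u, nx)).1,
        (bfsVisit g c (t, u, nx)).2.1, (bfsVisit g c (t, u, nx)).2.2) := rfl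
    have heta1 : bfsVisit1 g c (p, o, nx) = ((bfsVisit1 g c (p, o, nx)).1,
        (bfsVisit1 g c (p, o, nx)).2.1, (bfsVisit1 g c (p, o, nx)).2.2) := rfl
    have hnx : (bfsVisit g c (t, u, nx)).2.2 = (bfsVisit1 g c (p, o, nx)).2.2 := k2
    obtain ⟨m1, m2, ν2, m3, m4⟩ := ih (bfsVisit g c (t, u, nx)).1
      (bfsVisit g c (t, u, nx)).2.1 (bfsVisit1 g c (p, o, nx)).1
      (bfsVisit1 g c (p, o, nx)).2.1 (bfsVisit1 g c (p, o, nx)).2.2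
      k1 (fun x hx => by
        rw [show (bfsVisit1 g c (p, o, nx)).2.1 = o ++ ν1 from k3]
        exact List.mem_append.2 (Or.inl (hfr x (List.mem_cons_of_mem _ hx))))
    rw [hetaB, hnx, heta1]
    refine ⟨m1, m2, ν1 ++ ν2, ?_, ?_⟩
    · rw [m3, show (bfsVisit1 g c (p, o, nx)).2.1 = o ++ ν1 from k3, List.append_assoc]
    · rw [m4, show (bfsVisit1 g c (p, o, nx)).2.2 = nx ++ ν1 from k4, List.append_assoc]

-- the whole runs: the final tree of the level run is characterized by pass 1's output
lemma bfsRunSim (g : PySem.Dict Int (List Int)) :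
    ∀ (n : Nat) (t : PySem.Dict Int (List Int)) (u : PySem.Set Int)
      (p : PySem.Dict Int Int) (o fr : List Int),
      2 * (bfsUniv g \ u.toFinset).card + fr.length ≤ n →
      bfsCoupled t u p o → (∀ x ∈ fr, x ∈ o) →
      (bfsRunB g t u fr).keys = (bfsRun1 g p o fr).2 ∧
      (∀ v ∈ (bfsRun1 g p o fr).2, (bfsRunB g t u fr).getD v [] =
        (bfsRun1 g p o fr).1.getD v v ::
          ((bfsRun1 g p o fr).2.drop 1).filter
            (fun w => (bfsRun1 g p o fr).1.get? w == some v)) ∧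
      (bfsRun1 g p o fr).2.Nodup ∧
      (∀ w ∈ (bfsRun1 g p o fr).2, (bfsRun1 g p o fr).1.contains w = true) := by
  intro n
  induction n with
  | zero =>
    intro t u p o fr hle h _
    have : fr = [] := List.eq_nil_of_length_eq_zero (by omega)
    subst this
    rw [bfsRunB_nil, bfsRun1_nil]
    exact ⟨h.2.1, h.2.2.1, h.2.2.2.1, h.2.2.2.2.1⟩
  | succ n ih =>
    intro t u p o fr hle h hfr
    cases fr with
    | nil =>
      rw [bfsRunB_nil, bfsRun1_nil]
      exact ⟨h.2.1, h.2.2.1, h.2.2.2.1, h.2.2.2.2.1⟩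
    | cons c rest =>
      obtain ⟨ν, h1, h2, h3, h4⟩ := bfsLevel_spec g (c :: rest) t u []
      have h1' : ((c :: rest).foldl (bfsLevel g) (t, u, [])).2.2 = ν := by simpa using h1
      obtain ⟨k1, k2, ν', k3, k4⟩ := bfsLevelSim g (c :: rest) t u p o [] h hfr
      have hνν : ν = ν' := by
        have := k4
        rw [← k2, h1'] at this
        simpa using this
      subst hνν
      rw [bfsRunB_cons, bfsRun1_cons, k2]
      have hcard : (bfsUniv g \ (((c :: rest).foldl (bfsLevel g) (t, u, [])).2.1).toFinset).card
          + ν.length ≤ (bfsUniv g \ u.toFinset).card := by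
        refine bfsCard _ _ _ ν (by rw [h2]) h3 ?_
        intro y hy
        rw [List.mem_toFinset] at hy
        exact Finset.mem_sdiff.2 ⟨(h4 y hy).1, fun hm => (h4 y hy).2 (List.mem_toFinset.1 hm)⟩
      refine ih _ _ _ _ _ ?_ k1 ?_
      · rw [← k2, h1']
        simp only [List.length_cons] at hle
        omega
      · intro x hx
        rw [k3]
        rw [k4] at hx
        exact List.mem_append.2 (Or.inr (by simpa using hx))

-- A's run from the initial state equals the level-synchronous run
lemma bfsRunA_eq_runB_init (g t : PySem.Dict Int (List Int)) (root : Int) :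
    bfsRunA g t PySem.Set.empty [root] = bfsRunB g t [root] [root] := by
  have hadd : PySem.Set.add PySem.Set.empty root = [root] := rfl
  rw [bfsRunA_cons, hadd, List.nil_append, bfsRunB_cons]
  have hB : ([root].foldl (bfsLevel g) (t, [root], [])) = bfsVisit g root (t, [root], []) := rfl
  rw [hB]
  obtain ⟨ν, h1, h2, h3, h4⟩ := bfsVisit_spec root (PySem.Dict.getD g root []) t [root] []
  refine bfsRun_eq _ _ _ _ _ (le_refl _) ?_
  intro x hx
  have hx' : x ∈ ν := by
    have h1' : (bfsVisit g root (t, [root], [])).2.2 = ν := by simpa using h1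
    rwa [h1'] at hx
  have : x ∈ ((bfsVisit g root (t, [root], [])).2.1).toFinset := by
    have h2' : ((bfsVisit g root (t, [root], [])).2.1).toFinset
        = List.toFinset [root] ∪ ν.toFinset := h2
    rw [h2']
    exact Finset.mem_union_right _ (List.mem_toFinset.2 hx')
  exact List.mem_toFinset.1 this

-- the coupling holds at the initial states
lemma bfsCoupled_init (root : Int) :
    bfsCoupled ((PySem.Dict.empty : PySem.Dict Int (List Int)).insert root [root])
      [root] ((PySem.Dict.empty : PySem.Dict Int Int).insert root root) [root] := by
  refine ⟨?_, ?_, ?_, by simp, ?_, ?_, by simp, ?_⟩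
  · intro x
    rw [PySem.Dict.contains_insert]
    simp [PySem.Dict.contains_empty]
  · rw [PySem.Dict.keys_insert_of_not_contains _ [root] (PySem.Dict.contains_empty root)]
    simp [PySem.Dict.keys_empty]
  · intro v hv
    have : v = root := by simpa using hv
    subst this
    simp [PySem.Dict.getD_insert_self]
  · intro w hw
    have : w = root := by simpa using hw
    subst this
    simp [PySem.Dict.contains_insert_self]
  · intro x hx
    rw [PySem.Dict.contains_insert] at hx
    simp only [PySem.Dict.contains_empty, Bool.or_false] at hx
    simpa using hx
  · intro w a hwa
    rw [PySem.Dict.get?_insert] at hwa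
    by_cases hwr : w = root
    · rw [if_pos hwr] at hwa
      have : a = root := by simpa using hwa.symm
      subst this
      simp [PySem.Dict.contains_insert_self]
    · rw [if_neg hwr] at hwa
      rw [PySem.Dict.get?_empty] at hwa
      cases hwa

-- ===== VERDICT (by name: the statement is the Claim_ definition above) =====
theorem BFS_spec : Claim_equal_BFS := by
  intro graph root _ _
  unfold Spec_BFS BFS BFS_alt
  dsimp only
  set g := PySem.Dict.ofList graph with hg
  set t0 := (PySem.Dict.empty : PySem.Dict Int (List Int)).insert root [root] with ht0
  set p0 := (PySem.Dict.empty : PySem.Dict Int Int).insert root root with hp0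
  obtain ⟨m1, m2, m3, m4⟩ := bfsRunSim g
    (2 * (bfsUniv g \ ([root] : PySem.Set Int).toFinset).card + 1)
    t0 [root] p0 [root] [root] (le_refl _) (bfsCoupled_init root)
    (fun x hx => hx)
  set R := bfsRun1 g p0 [root] [root] with hR
  set T := bfsRunB g t0 [root] [root] with hT
  -- A's side
  rw [bfsRunA_eq_runB_init, ← hT]
  have hitems : T.items = R.2.map (fun v => (v, T.getD v [])) := by
    rw [PySem.Dict.items_eq_map_keys T (m1 ▸ m3) [], m1]
  -- B's side: the comprehension over distinct keys appends all pairs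
  have hfresh : ∀ a ∈ R.2,
      (PySem.Dict.empty : PySem.Dict Int (List Int)).contains a = false := fun a _ =>
    PySem.Dict.contains_empty a
  have hcompr := PySem.Dict.items_foldl_insert_fresh R.2 (fun v => v)
    (fun v => PySem.Dict.getD R.1 v v ::
      PySem.Dict.getD ((R.2.drop 1).foldl
        (fun d w => PySem.Dict.modify d (PySem.Dict.getD R.1 w w) [] (fun l => l ++ [w]))
        (PySem.Dict.empty : PySem.Dict Int (List Int))) v [])
    (PySem.Dict.empty : PySem.Dict Int (List Int)) hfresh (by simpa using m3)
  dsimp only at hcompr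
  have hempty : (PySem.Dict.empty : PySem.Dict Int (List Int)).items = [] := rfl
  rw [hitems, hcompr, hempty, List.nil_append]
  -- pointwise equality of the two maps
  refine List.map_congr_left ?_
  intro v hv
  rw [m2 v hv]
  -- children.getD v [] is the filter of order[1:] keeping nodes whose parent is v
  have hchild : PySem.Dict.getD ((R.2.drop 1).foldl
      (fun d w => PySem.Dict.modify d (PySem.Dict.getD R.1 w w) [] (fun l => l ++ [w]))
      (PySem.Dict.empty : PySem.Dict Int (List Int))) v []
      = (R.2.drop 1).filter (fun w => PySem.Dict.getD R.1 w w == v) := by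
    rw [show (R.2.drop 1).foldl
        (fun d w => PySem.Dict.modify d (PySem.Dict.getD R.1 w w) [] (fun l => l ++ [w]))
        (PySem.Dict.empty : PySem.Dict Int (List Int))
        = ((R.2.drop 1).map (fun w => (PySem.Dict.getD R.1 w w, w))).foldl
          (fun d q => PySem.Dict.modify d q.1 [] (fun l => l ++ [q.2]))
          (PySem.Dict.empty : PySem.Dict Int (List Int)) from by rw [List.foldl_map]]
    rw [PySem.Dict.getD_foldl_modify_append]
    rw [PySem.Dict.getD_empty, List.nil_append]
    rw [List.filter_map, List.map_map]
    rw [show ((fun x : Int × Int => x.2) ∘ fun w : Int => (R.1.getD w w, w)) = id from rfl,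
      List.map_id]
    exact List.filter_congr (fun w _ => rfl)
  rw [hchild]
  -- the two filter predicates agree on order[1:]
  have hpred : ∀ w ∈ R.2.drop 1,
      ((R.1.get? w == some v) : Bool) = (PySem.Dict.getD R.1 w w == v) := by
    intro w hw
    have hwo : w ∈ R.2 := List.mem_of_mem_drop hw
    have hcw := m4 w hwo
    rw [PySem.Dict.contains_eq_isSome_get?] at hcw
    cases hga : R.1.get? w with
    | none => rw [hga] at hcw; cases hcw
    | some a =>
      rw [PySem.Dict.getD_of_get?_eq_some _ w hga]
      simp
  rw [List.filter_congr hpred]
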